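-- pv_equiv track=rewrite | github.com/clementlab/mutsuite | src/mutsuite/mutSimUtils.py | unexplodeMDZ
-- ===== SOURCE A (Python) =====
-- def unexplodeMDZ(exploded_mdz_arr):
--     """
--         :param exploded_mdz_arr: array of mdz operations (= for matched bases, "A" for sub A, "^A" e.g. for deleted A)
--         :return: mdz string
--     """
--     mdz = ""
--     match_count_so_far = 0
--     deleted_char_str = ""
--
--     for el in exploded_mdz_arr:
--         if el == "=":  # match base
--             if deleted_char_str != "":
--                 mdz += "^" + deleted_char_str
--                 deleted_char_str = ""
--             match_count_so_far += 1
--         elif el.startswith('^'):  # deletion base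
--             if match_count_so_far != 0:
--                 mdz += str(match_count_so_far)
--                 match_count_so_far = 0
--             deleted_char_str += el[1]
--         else:  # substitution base
--             if deleted_char_str != "":
--                 mdz += "^" + deleted_char_str
--                 deleted_char_str = ""
--             if match_count_so_far != 0:
--                 mdz += str(match_count_so_far)
--                 match_count_so_far = 0
--             else:  # if transitioning from a previous deletion or substitution
--                 if len(mdz) > 0:
--                     mdz += "0"
--             mdz += el
--
--     if deleted_char_str != "":
--         mdz += "^" + deleted_char_str
--         deleted_char_str = ""
--     if match_count_so_far != 0:
--         mdz += str(match_count_so_far)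
--         match_count_so_far = 0
--
--     return mdz
-- ===== SOURCE B (Python) =====
-- def unexplodeMDZ(exploded_mdz_arr):
--     """
--         :param exploded_mdz_arr: array of mdz operations (= for matched bases, "A" for sub A, "^A" e.g. for deleted A)
--         :return: mdz string
--     """
--     # Phase 1: group the exploded ops into tokens: ('m', run-length of '='),
--     # ('d', concatenated deleted chars), ('s', substitution element).
--     tokens = []
--     for el in exploded_mdz_arr:
--         if el == "=":
--             if tokens and tokens[-1][0] == 'm':
--                 tokens[-1] = ('m', tokens[-1][1] + 1)
--             else:
--                 tokens.append(('m', 1))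
--         elif el.startswith('^'):
--             if tokens and tokens[-1][0] == 'd':
--                 tokens[-1] = ('d', tokens[-1][1] + el[1])
--             else:
--                 tokens.append(('d', el[1]))
--         else:
--             tokens.append(('s', el))
--     # Phase 2: emit the MD:Z string from the token list.
--     out = ""
--     prev = None
--     for kind, val in tokens:
--         if kind == 'm':
--             out += str(val)
--         elif kind == 'd':
--             out += '^' + val
--         else:
--             if out and prev != 'm':
--                 out += '0'
--             out += val
--         prev = kind
--     return out
-- ===== Notes on version B (the rewrite author's own statement) =====
-- stated objective: alternative
-- what changed: Replaces A's inline flushing state machine (pending match-count and deletion-string flushed into the output mid-loop) by a two-phase group-then-emit structure: one pass groups the exploded ops into match-run/deletion-run/substitution tokens, a second pass renders the token list, deciding the '0' separator from the previous token's kind.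
import Mathlib
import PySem

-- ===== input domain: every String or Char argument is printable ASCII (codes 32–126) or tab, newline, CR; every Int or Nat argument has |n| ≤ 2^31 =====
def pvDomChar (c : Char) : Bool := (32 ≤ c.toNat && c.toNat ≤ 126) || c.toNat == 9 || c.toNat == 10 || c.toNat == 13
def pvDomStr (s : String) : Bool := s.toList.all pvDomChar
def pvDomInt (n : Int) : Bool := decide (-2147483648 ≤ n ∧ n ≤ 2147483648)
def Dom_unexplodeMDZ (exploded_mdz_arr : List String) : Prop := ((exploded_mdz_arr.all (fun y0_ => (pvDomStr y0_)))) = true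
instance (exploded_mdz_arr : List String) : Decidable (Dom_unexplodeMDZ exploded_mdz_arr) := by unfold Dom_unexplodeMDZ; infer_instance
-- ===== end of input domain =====

-- B replaces A's inline flushing state machine by a two-phase group-then-emit decomposition
-- (tokenize runs, then render); same O(n) cost, objective: alternative structure.

-- ===== PORT A =====
-- el[1] as Python computes it (a one-character string); none = IndexError, excluded by Pre_
def pvEl1 (el : String) : String :=
  match PySem.Str.pyGet? el 1 with
  | some c => String.ofList [c]
  | none => ""

-- one iteration of A's for-loop over state (mdz, match_count_so_far, deleted_char_str)
def pvStepA (st : String × Int × String) (el : String) : String × Int × String :=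
  if el = "=" then
    let mdz := if st.2.2 ≠ "" then st.1 ++ "^" ++ st.2.2 else st.1
    (mdz, st.2.1 + 1, "")
  else if PySem.Str.startswith el "^" then
    let mdz := if st.2.1 ≠ 0 then st.1 ++ PySem.Int.toStr st.2.1 else st.1
    (mdz, 0, st.2.2 ++ pvEl1 el)
  else
    let mdz := if st.2.2 ≠ "" then st.1 ++ "^" ++ st.2.2 else st.1
    let mdz := if st.2.1 ≠ 0 then mdz ++ PySem.Int.toStr st.2.1
               else if 0 < PySem.Str.len mdz then mdz ++ "0" else mdz
    (mdz ++ el, 0, "")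

def unexplodeMDZ (exploded_mdz_arr : List String) : String :=
  let st := exploded_mdz_arr.foldl pvStepA ("", 0, "")
  let mdz := if st.2.2 ≠ "" then st.1 ++ "^" ++ st.2.2 else st.1
  if st.2.1 ≠ 0 then mdz ++ PySem.Int.toStr st.2.1 else mdz

-- ===== PORT B =====
-- tokens of Source B's phase 1: ('m', count) / ('d', chars) / ('s', el)
inductive MdzTok : Type
  | m : Int → MdzTok
  | d : String → MdzTok
  | s : String → MdzTok
deriving DecidableEq, Repr

-- the kind tag 'prev' of Source B's phase 2
inductive MdzKind : Type
  | m | d | s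
deriving DecidableEq, Repr

-- Source B's el[1] (one-character string); none = IndexError, excluded by Pre_
def pvEl1B (el : String) : String :=
  match PySem.Str.pyGet? el 1 with
  | some c => String.ofList [c]
  | none => ""

-- phase 1 step; the token list is kept REVERSED (head = Source B's tokens[-1]), so
-- 'append'/'modify the last token' become cons/modify the head; reversed at the end.
def pvTokStep (revToks : List MdzTok) (el : String) : List MdzTok :=
  if el = "=" then
    match revToks with
    | MdzTok.m n :: rest => MdzTok.m (n + 1) :: rest
    | _ => MdzTok.m 1 :: revToks
  else if PySem.Str.startswith el "^" then
    match revToks with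
    | MdzTok.d s :: rest => MdzTok.d (s ++ pvEl1B el) :: rest
    | _ => MdzTok.d (pvEl1B el) :: revToks
  else
    MdzTok.s el :: revToks

-- phase 2 step over (out, prev)
def pvEmitStep (st : String × Option MdzKind) (t : MdzTok) : String × Option MdzKind :=
  match t with
  | MdzTok.m n => (st.1 ++ PySem.Int.toStr n, some MdzKind.m)
  | MdzTok.d s => (st.1 ++ "^" ++ s, some MdzKind.d)
  | MdzTok.s v =>
      ((if st.1 ≠ "" ∧ st.2 ≠ some MdzKind.m then st.1 ++ "0" else st.1) ++ v, some MdzKind.s)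

def unexplodeMDZ_alt (exploded_mdz_arr : List String) : String :=
  let tokens := (exploded_mdz_arr.foldl pvTokStep []).reverse
  (tokens.foldl pvEmitStep ("", none)).1

-- ===== PRECONDITION & SPEC =====
-- Pre_ excludes exactly the inputs containing an element "^" (starts with '^' but has no
-- second character): there the Python A (and B) raise IndexError on el[1].
def Pre_unexplodeMDZ (exploded_mdz_arr : List String) : Prop :=
  ∀ el ∈ exploded_mdz_arr, PySem.Str.startswith el "^" = true → 2 ≤ PySem.Str.len el
instance (exploded_mdz_arr : List String) : Decidable (Pre_unexplodeMDZ exploded_mdz_arr) := by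
  unfold Pre_unexplodeMDZ; infer_instance

def pvWitness_unexplodeMDZ : List String := ["=", "=", "^A", "^C", "T", "G", "="]

def Spec_unexplodeMDZ (exploded_mdz_arr : List String) (out : String) : Prop :=
  out = unexplodeMDZ_alt exploded_mdz_arr
instance (exploded_mdz_arr : List String) (out : String) : Decidable (Spec_unexplodeMDZ exploded_mdz_arr out) := by
  unfold Spec_unexplodeMDZ; infer_instance

-- ===== CLAIM (what is proved, stated in full; the proofs are below) =====
def Claim_equal_unexplodeMDZ : Prop := ∀ (exploded_mdz_arr : List String), Dom_unexplodeMDZ exploded_mdz_arr → Pre_unexplodeMDZ exploded_mdz_arr → Spec_unexplodeMDZ exploded_mdz_arr (unexplodeMDZ exploded_mdz_arr)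

-- ===== LEMMAS AND PROOFS =====

theorem pvEl1B_eq : pvEl1B = pvEl1 := rfl

-- rendering of a token list (phase 2 of B, as a function of the token list)
def pvEmitP (toks : List MdzTok) : String × Option MdzKind :=
  toks.foldl pvEmitStep ("", none)

-- abstraction: the A-state represented by a reversed token list
def pvAbs (r : List MdzTok) : String × Int × String :=
  match r with
  | MdzTok.m n :: rest => ((pvEmitP rest.reverse).1, n, "")
  | MdzTok.d s :: rest => ((pvEmitP rest.reverse).1, 0, s)
  | _ => ((pvEmitP r.reverse).1, 0, "")

-- invariant on the head token of the reversed token list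
def pvInv (r : List MdzTok) : Prop :=
  match r with
  | MdzTok.m n :: _ => 1 ≤ n
  | MdzTok.d s :: _ => s ≠ ""
  | _ => True

theorem pvEmitP_append (toks : List MdzTok) (t : MdzTok) :
    pvEmitP (toks ++ [t]) = pvEmitStep (pvEmitP toks) t := by
  simp [pvEmitP, List.foldl_append]

theorem pvEmitP_append2 (toks : List MdzTok) (a b : MdzTok) :
    pvEmitP (toks ++ [a, b]) = pvEmitStep (pvEmitP (toks ++ [a])) b := by
  rw [show toks ++ [a, b] = (toks ++ [a]) ++ [b] by simp, pvEmitP_append]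

theorem pvEl1_ne_empty (el : String)
    (h2 : 2 ≤ PySem.Str.len el) : pvEl1 el ≠ "" := by
  unfold pvEl1
  have hl : 2 ≤ el.toList.length := by
    simpa [String.length_toList] using h2
  obtain ⟨a, b, t, hl2⟩ : ∃ a b t, el.toList = a :: b :: t := by
    rcases hx : el.toList with _ | ⟨a, _ | ⟨b, t⟩⟩ <;> simp_all
  rw [show PySem.Str.pyGet? el 1 = PySem.List.pyGet? el.toList 1 from by
        simp [PySem.Str.pyGet?]]
  rw [hl2]
  simp [PySem.List.pyGet?, PySem.List.pyIdx?]

theorem pvAppend_ne_empty (a b : String) (h : a ≠ "") : a ++ b ≠ "" := by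
  simp_all [← String.toList_eq_nil_iff]

theorem pvCaret_ne_empty (a b : String) : a ++ "^" ++ b ≠ "" := by
  simp [← String.toList_eq_nil_iff]

-- one step of A equals one step of B on the abstraction, and the invariant is kept
theorem pvStep_abs (el : String) (h1 : PySem.Str.startswith el "^" = true → 2 ≤ PySem.Str.len el)
    (r : List MdzTok) (hInv : pvInv r) :
    pvStepA (pvAbs r) el = pvAbs (pvTokStep r el) ∧ pvInv (pvTokStep r el) := by
  by_cases heq : el = "="
  · subst heq
    cases r with
    | nil => simp [pvStepA, pvTokStep, pvAbs, pvInv]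
    | cons t rest =>
        cases t with
        | m n =>
            have hn : (1:Int) ≤ n := hInv
            constructor
            · simp [pvStepA, pvTokStep, pvAbs]
            · show (1:Int) ≤ n + 1
              omega
        | d s =>
            have hs : s ≠ "" := hInv
            refine ⟨?_, by simp [pvTokStep, pvInv]⟩
            simp [pvStepA, pvTokStep, pvAbs, hs, pvEmitP_append, pvEmitStep]
        | s v =>
            refine ⟨?_, by simp [pvTokStep, pvInv]⟩
            simp [pvStepA, pvTokStep, pvAbs]
  · by_cases hc : PySem.Str.startswith el "^" = true
    · have hne := pvEl1_ne_empty el (h1 hc)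
      have hc2 : PySem.Chars.startswith el.toList ['^'] = true := by simpa using hc
      cases r with
      | nil =>
          refine ⟨?_, ?_⟩
          · simp [pvStepA, pvTokStep, pvAbs, heq, hc2, pvEl1B_eq]
          · simp only [pvTokStep, if_neg heq, if_pos hc, pvEl1B_eq]
            exact hne
      | cons t rest =>
          cases t with
          | m n =>
              have hn : ¬ (n = 0) := by have : (1:Int) ≤ n := hInv; omega
              refine ⟨?_, ?_⟩
              · simp [pvStepA, pvTokStep, pvAbs, heq, hc2, hn, pvEmitP_append, pvEmitStep, pvEl1B_eq]
              · simp only [pvTokStep, if_neg heq, if_pos hc, pvEl1B_eq]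
                exact hne
          | d s =>
              have hs : s ≠ "" := hInv
              refine ⟨?_, ?_⟩
              · simp [pvStepA, pvTokStep, pvAbs, heq, hc2, pvEl1B_eq]
              · simp only [pvTokStep, if_neg heq, if_pos hc, pvEl1B_eq]
                exact pvAppend_ne_empty s (pvEl1 el) hs
          | s v =>
              refine ⟨?_, ?_⟩
              · simp [pvStepA, pvTokStep, pvAbs, heq, hc2, pvEl1B_eq]
              · simp only [pvTokStep, if_neg heq, if_pos hc, pvEl1B_eq]
                exact hne
    · -- substitution branch
      have hc2 : ¬ PySem.Chars.startswith el.toList ['^'] = true := by simpa using hc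
      cases r with
      | nil =>
          refine ⟨?_, by simp [pvTokStep, pvInv, heq, hc2]⟩
          simp [pvStepA, pvTokStep, pvAbs, heq, hc2, pvEmitP, pvEmitStep]
      | cons t rest =>
          cases t with
          | m n =>
              have hn : ¬ (n = 0) := by have : (1:Int) ≤ n := hInv; omega
              refine ⟨?_, by simp [pvTokStep, pvInv, heq, hc2]⟩
              simp [pvStepA, pvTokStep, pvAbs, heq, hc2, hn, pvEmitP_append2,
                    pvEmitP_append, pvEmitStep]
          | d s =>
              have hs : s ≠ "" := hInv
              refine ⟨?_, by simp [pvTokStep, pvInv, heq, hc2]⟩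
              have hne2 : (pvEmitP rest.reverse).1 ++ "^" ++ s ≠ "" := pvCaret_ne_empty _ s
              have hpos : (0:Int) < ((pvEmitP rest.reverse).1.length : Int) + ((s.length : Int) + 1) := by
                omega
              simp [pvStepA, pvTokStep, pvAbs, heq, hc2, hs, hpos, pvEmitP_append2,
                    pvEmitP_append, pvEmitStep, hne2]
          | s v =>
              refine ⟨?_, by simp [pvTokStep, pvInv, heq, hc2]⟩
              have hstep : pvTokStep (MdzTok.s v :: rest) el = MdzTok.s el :: MdzTok.s v :: rest := by
                simp [pvTokStep, heq, hc2]
              rw [hstep]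
              have hsnd : (pvEmitP (rest.reverse ++ [MdzTok.s v])).2 = some MdzKind.s := by
                rw [pvEmitP_append]; rfl
              by_cases hout : (pvEmitP (rest.reverse ++ [MdzTok.s v])).1 = ""
              · simp [pvStepA, pvAbs, pvEmitStep, pvEmitP_append2, heq, hc2, hout, hsnd]
              · have hlen : 0 < (pvEmitP (rest.reverse ++ [MdzTok.s v])).1.length := by
                  have h := List.length_pos_iff.mpr
                    (by simpa [ne_eq, ← String.toList_eq_nil_iff] using hout)
                  rwa [String.length_toList] at h
                simp [pvStepA, pvAbs, pvEmitStep, pvEmitP_append2, heq, hc2, hout, hsnd, hlen]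

-- the whole loop of A tracks B's tokenization
theorem pvLoop_abs (xs : List String) (r : List MdzTok)
    (hx : ∀ el ∈ xs, PySem.Str.startswith el "^" = true → 2 ≤ PySem.Str.len el)
    (hInv : pvInv r) :
    xs.foldl pvStepA (pvAbs r) = pvAbs (xs.foldl pvTokStep r) ∧ pvInv (xs.foldl pvTokStep r) := by
  induction xs generalizing r with
  | nil => exact ⟨rfl, hInv⟩
  | cons x xs ih =>
      obtain ⟨h1, h2⟩ := pvStep_abs x (hx x (by simp)) r hInv
      have := ih (pvTokStep r x) (fun el hel => hx el (by simp [hel])) h2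
      simpa [h1] using this

-- A's final flush of a represented state is B's rendering of the full token list
theorem pvFinal_abs (r : List MdzTok) (hInv : pvInv r) :
    (let st := pvAbs r
     let mdz := if st.2.2 ≠ "" then st.1 ++ "^" ++ st.2.2 else st.1
     if st.2.1 ≠ 0 then mdz ++ PySem.Int.toStr st.2.1 else mdz) = (pvEmitP r.reverse).1 := by
  cases r with
  | nil => rfl
  | cons t rest =>
      cases t with
      | m n =>
          have hn : ¬ (n = 0) := by have : (1:Int) ≤ n := hInv; omega
          rw [List.reverse_cons, pvEmitP_append]
          simp [pvAbs, hn, pvEmitStep]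
      | d s =>
          have hs : s ≠ "" := hInv
          rw [List.reverse_cons, pvEmitP_append]
          simp [pvAbs, hs, pvEmitStep]
      | s v =>
          simp [pvAbs]

-- ===== VERDICT (by name: the statement is the Claim_ definition above) =====
theorem unexplodeMDZ_spec : Claim_equal_unexplodeMDZ := by
  intro arr _hDom hPre
  show unexplodeMDZ arr = unexplodeMDZ_alt arr
  have h0 : pvAbs ([] : List MdzTok) = ("", 0, "") := rfl
  obtain ⟨h1, h2⟩ := pvLoop_abs arr [] hPre trivial
  have := pvFinal_abs (arr.foldl pvTokStep []) h2
  simp only [unexplodeMDZ, unexplodeMDZ_alt, ← h0, h1]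
  exact this
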